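-- pv_equiv track=rewrite | github.com/bradyz/sandbox | challenges/foobar/rustycalculator.py | solve
-- ===== SOURCE A (Python) =====
-- def solve(str):
--     s = []
--     t = str.split("+")
--     for i in range(len(t)):
--         if t[i] == "+":
--             continue
--         s.append(t[i])
--     for _ in range(len(t)-1):
--         s.append("+")
--     for i in range(len(s)):
--         if "*" not in s[i]:
--             continue
--         t = s[i].split("*")
--         x = []
--         for j in range(len(t)):
--             x.append(t[j])
--         for _ in range(len(t)-1):
--             x.append("*")
--         s[i] = x
--     return "".join(map(lambda x: "".join(x), s))
-- ===== SOURCE B (Python) =====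
-- def solve(str):
--     out = []
--     stars = 0
--     pluses = 0
--     for c in str:
--         if c == '*':
--             stars += 1
--         elif c == '+':
--             out.append('*' * stars)
--             stars = 0
--             pluses += 1
--         else:
--             out.append(c)
--     out.append('*' * stars)
--     out.append('+' * pluses)
--     return ''.join(out)
-- ===== Notes on version B (the rewrite author's own statement) =====
-- stated objective: simpler
-- what changed: Replaced A's split-based rebuild (split the string on plus signs, per-chunk split on stars, re-append parts and separators, join a heterogeneous list of strings and lists) with one left-to-right character scan keeping an output buffer and two counters of deferred stars/pluses.
import Mathlib
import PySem

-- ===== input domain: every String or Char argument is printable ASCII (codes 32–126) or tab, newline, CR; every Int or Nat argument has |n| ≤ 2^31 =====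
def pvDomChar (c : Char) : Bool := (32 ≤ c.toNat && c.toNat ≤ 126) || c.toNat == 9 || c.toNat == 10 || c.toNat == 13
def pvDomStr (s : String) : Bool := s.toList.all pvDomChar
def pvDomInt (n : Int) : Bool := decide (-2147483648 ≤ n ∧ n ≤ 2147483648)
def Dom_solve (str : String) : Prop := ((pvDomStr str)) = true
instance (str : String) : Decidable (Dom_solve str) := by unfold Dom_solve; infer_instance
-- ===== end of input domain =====

-- B replaces A's split-based rebuild by a single character scan with an output buffer and star/plus counters (same result, plainer structure; not claimed faster).

-- ===== PORT A =====
-- A's third loop body: if '*' in s[i], split s[i] on '*', re-append the parts then the stars, store back (joined).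
def solveChunkFix (si : List Char) : List Char :=
  if PySem.Chars.isIn ['*'] si = false then si
  else
    let t := PySem.Chars.splitOn si ['*']
    let x := t.foldl (fun x tj => x ++ [tj]) ([] : List (List Char))
    let x := x ++ List.replicate (t.length - 1) ['*']
    PySem.Chars.join [] x

def solve (str : String) : String :=
  let t := PySem.Chars.splitOn str.toList ['+']
  -- first loop (the `t[i] == "+"` guard of A is kept although split never yields "+")
  let s := t.foldl (fun s ti => if ti = ['+'] then s else s ++ [ti]) ([] : List (List Char))
  -- second loop
  let s := s ++ List.replicate (t.length - 1) ['+']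
  -- third loop (in-place fix of each element) and the final "".join
  let s := s.map solveChunkFix
  String.mk (PySem.Chars.join [] s)

-- ===== PORT B =====
def solve_alt (str : String) : String :=
  let r := str.toList.foldl (fun (acc : List Char × Nat × Nat) c =>
      if c == '*' then (acc.1, acc.2.1 + 1, acc.2.2)
      else if c == '+' then (acc.1 ++ List.replicate acc.2.1 '*', 0, acc.2.2 + 1)
      else (acc.1 ++ [c], acc.2.1, acc.2.2)) (([] : List Char), (0 : Nat), (0 : Nat))
  String.mk (r.1 ++ List.replicate r.2.1 '*' ++ List.replicate r.2.2 '+')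

-- ===== PRECONDITION & SPEC =====
def Spec_solve (str : String) (out : String) : Prop := out = solve_alt str
instance (str : String) (out : String) : Decidable (Spec_solve str out) := by unfold Spec_solve; infer_instance

-- ===== CLAIM (what is proved, stated in full; the proofs are below) =====
def Claim_equal_solve : Prop := ∀ (str : String), Dom_solve str → Spec_solve str (solve str)

-- ===== LEMMAS AND PROOFS =====

-- structural split on a single separator: (first chunk, remaining chunks)
def splitC (c : Char) : List Char → List Char × List (List Char)
  | [] => ([], [])
  | a :: l =>
    let r := splitC c l
    if a = c then ([], r.1 :: r.2) else (a :: r.1, r.2)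

lemma splitC_nil (c : Char) : splitC c [] = ([], []) := rfl

lemma splitC_cons_self (c : Char) (l : List Char) :
    splitC c (c :: l) = ([], (splitC c l).1 :: (splitC c l).2) := by
  simp [splitC]

lemma splitC_cons_ne (c a : Char) (l : List Char) (h : a ≠ c) :
    splitC c (a :: l) = (a :: (splitC c l).1, (splitC c l).2) := by
  simp [splitC, h]

lemma splitC_append_not_mem (c : Char) (w l : List Char) (hw : c ∉ w) :
    splitC c (w ++ l) = (w ++ (splitC c l).1, (splitC c l).2) := by
  induction w with
  | nil => simp
  | cons a w ih =>
    have ha : a ≠ c := by intro h; exact hw (h ▸ List.mem_cons_self)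
    have hw' : c ∉ w := fun h => hw (List.mem_cons_of_mem _ h)
    simp [splitC_cons_ne c a _ ha, ih hw']

-- PySem.Chars.splitOn on a single-char separator is splitC
lemma splitOn_go_eq (c : Char) : ∀ (fuel : Nat) (l cur : List Char) (acc : List (List Char)),
    l.length < fuel →
    PySem.Chars.splitOn.go [c] fuel l cur acc
      = acc.reverse ++ ((cur.reverse ++ (splitC c l).1) :: (splitC c l).2) := by
  intro fuel
  induction fuel with
  | zero => intro l cur acc h; omega
  | succ fuel ih =>
    intro l cur acc h
    cases l with
    | nil => simp [PySem.Chars.splitOn.go, splitC_nil]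
    | cons a rest =>
      by_cases hac : a = c
      · subst hac
        have : PySem.Chars.splitOn.go [a] (fuel + 1) (a :: rest) cur acc
            = PySem.Chars.splitOn.go [a] fuel (List.drop 1 (a :: rest)) [] (cur.reverse :: acc) := by
          simp [PySem.Chars.splitOn.go, List.isPrefixOf]
        rw [this]
        simp only [List.drop_one, List.tail_cons]
        rw [ih rest [] (cur.reverse :: acc) (by simpa using h)]
        simp [splitC_cons_self]
      · have : PySem.Chars.splitOn.go [c] (fuel + 1) (a :: rest) cur acc
            = PySem.Chars.splitOn.go [c] fuel rest (a :: cur) acc := by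
          simp [PySem.Chars.splitOn.go, List.isPrefixOf, hac, Ne.symm hac]
        rw [this]
        rw [ih rest (a :: cur) acc (by simpa using h)]
        simp [splitC_cons_ne c a rest hac]

lemma splitOn_eq_splitC (c : Char) (l : List Char) :
    PySem.Chars.splitOn l [c] = (splitC c l).1 :: (splitC c l).2 := by
  have := splitOn_go_eq c (l.length + 1) l [] [] (by omega)
  simpa [PySem.Chars.splitOn] using this

-- chunks of splitC never contain the separator
lemma not_mem_splitC (c : Char) (l : List Char) :
    c ∉ (splitC c l).1 ∧ ∀ p ∈ (splitC c l).2, c ∉ p := by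
  induction l with
  | nil => simp [splitC_nil]
  | cons a l ih =>
    by_cases hac : a = c
    · subst hac
      simp only [splitC_cons_self]
      refine ⟨by simp, ?_⟩
      intro p hp
      rcases List.mem_cons.mp hp with h | h
      · exact h ▸ ih.1
      · exact ih.2 p h
    · simp only [splitC_cons_ne c a l hac]
      exact ⟨by simp [Ne.symm hac, ih.1], ih.2⟩

lemma flatten_splitC (c : Char) (l : List Char) :
    (splitC c l).1 ++ (splitC c l).2.flatten = l.filter (fun x => !(x == c)) := by
  induction l with
  | nil => simp [splitC_nil]
  | cons a l ih =>
    by_cases hac : a = c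
    · subst hac; simp [splitC_cons_self, ih]
    · simp [splitC_cons_ne c a l hac, hac, ih]

lemma length_splitC (c : Char) (l : List Char) :
    (splitC c l).2.length = l.count c := by
  induction l with
  | nil => simp [splitC_nil]
  | cons a l ih =>
    by_cases hac : a = c
    · subst hac; simp [splitC_cons_self, ih, List.count_cons]
    · simp [splitC_cons_ne c a l hac, ih, List.count_cons, hac]

-- join with empty separator is flatten
lemma join_nil_eq_flatten (parts : List (List Char)) :
    PySem.Chars.join [] parts = parts.flatten := by
  induction parts with
  | nil => simp [PySem.Chars.join, List.intercalate]
  | cons p ps ih =>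
    cases ps with
    | nil => simp [PySem.Chars.join, List.intercalate]
    | cons q qs =>
      have : PySem.Chars.join [] (p :: q :: qs) = p ++ [] ++ PySem.Chars.join [] (q :: qs) := by
        simp [PySem.Chars.join, List.intercalate, List.intersperse]
      rw [this, ih]; simp

-- singleton-infix ↔ membership (for the `"*" in s[i]` test)
lemma singleton_infix_iff (c : Char) (s : List Char) : [c] <:+: s ↔ c ∈ s := by
  constructor
  · intro h; exact h.subset (List.mem_cons_self)
  · intro h
    obtain ⟨u, v, huv⟩ := List.append_of_mem h
    exact ⟨u, v, by simp [huv]⟩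

-- per-chunk intended result: non-stars in order, then the stars
def hh (p : List Char) : List Char :=
  p.filter (fun x => !(x == '*')) ++ List.replicate (p.count '*') '*'

lemma foldl_append_singleton {α : Type} : ∀ (t : List α) (a : List α),
    t.foldl (fun x tj => x ++ [tj]) a = a ++ t := by
  intro t
  induction t with
  | nil => simp
  | cons x xs ih => intro a; simp [ih]

lemma solveChunkFix_eq_hh (p : List Char) : solveChunkFix p = hh p := by
  by_cases hm : '*' ∈ p
  · have hin : PySem.Chars.isIn ['*'] p = true := by
      rw [PySem.Chars.isIn_iff_infix, singleton_infix_iff]; exact hm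
    simp only [solveChunkFix, hin, Bool.true_eq_false, if_false]
    rw [splitOn_eq_splitC, foldl_append_singleton]
    simp only [List.nil_append]
    rw [join_nil_eq_flatten]
    have hlen : ((splitC '*' p).1 :: (splitC '*' p).2).length - 1 = p.count '*' := by
      simp [length_splitC]
    rw [List.flatten_append, hlen]
    have : (List.replicate (p.count '*') ['*']).flatten = List.replicate (p.count '*') '*' := by
      induction (p.count '*') with
      | zero => simp
      | succ n ih => simp [List.replicate_succ, ih]
    rw [this]
    simp [hh, flatten_splitC]
  · have hin : PySem.Chars.isIn ['*'] p = false := by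
      rw [PySem.Chars.isIn_eq_false_iff]
      rw [singleton_infix_iff]; exact hm
    have hcnt : p.count '*' = 0 := List.count_eq_zero.mpr hm
    have hfil : p.filter (fun x => !(x == '*')) = p := by
      apply List.filter_eq_self.mpr
      intro x hx
      simp only [Bool.not_eq_eq_eq_not, Bool.not_true, beq_eq_false_iff_ne]
      intro hxc; exact hm (hxc ▸ hx)
    simp [solveChunkFix, hin, hh, hcnt, hfil]

-- closed form of port A
def coreSpec (cs : List Char) : List Char :=
  (((splitC '+' cs).1 :: (splitC '+' cs).2).map hh).flatten
    ++ List.replicate ((splitC '+' cs).2.length) '+'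

lemma foldl_dead_guard : ∀ (t : List (List Char)) (a : List (List Char)),
    (∀ ti ∈ t, ti ≠ ['+']) →
    t.foldl (fun s ti => if ti = ['+'] then s else s ++ [ti]) a = a ++ t := by
  intro t
  induction t with
  | nil => simp
  | cons x xs ih =>
    intro a h
    have hx : x ≠ ['+'] := h x List.mem_cons_self
    simp only [List.foldl_cons, if_neg hx]
    rw [ih (a ++ [x]) (fun ti hti => h ti (List.mem_cons_of_mem _ hti))]
    simp

lemma solve_eq_coreSpec (str : String) : solve str = String.mk (coreSpec str.toList) := by
  unfold solve
  dsimp only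
  rw [splitOn_eq_splitC]
  have hne : ∀ ti ∈ (splitC '+' str.toList).1 :: (splitC '+' str.toList).2, ti ≠ ['+'] := by
    intro ti hti heq
    have hmem : '+' ∉ ti := by
      rcases List.mem_cons.mp hti with h | h
      · exact h ▸ (not_mem_splitC '+' str.toList).1
      · exact (not_mem_splitC '+' str.toList).2 ti h
    exact hmem (heq ▸ List.mem_cons_self)
  rw [foldl_dead_guard _ _ hne]
  simp only [List.nil_append, List.length_cons, Nat.add_sub_cancel]
  rw [List.map_append, List.map_replicate]
  have hfix : solveChunkFix ['+'] = ['+'] := by decide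
  rw [hfix, join_nil_eq_flatten, List.flatten_append]
  have hrep : (List.replicate (splitC '+' str.toList).2.length ['+']).flatten
      = List.replicate (splitC '+' str.toList).2.length '+' := by
    induction ((splitC '+' str.toList).2.length) with
    | zero => simp
    | succ n ih => simp [List.replicate_succ, ih]
  rw [hrep]
  have hmap : (((splitC '+' str.toList).1 :: (splitC '+' str.toList).2).map solveChunkFix)
      = ((splitC '+' str.toList).1 :: (splitC '+' str.toList).2).map hh := by
    apply List.map_congr_left
    intro p _
    exact solveChunkFix_eq_hh p
  rw [hmap]
  rfl

-- B-side invariant: coreSpec with pending stars prepended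
def kfun (st : Nat) (cs : List Char) : List Char := coreSpec (List.replicate st '*' ++ cs)

lemma not_plus_mem_replicate_star (st : Nat) : '+' ∉ List.replicate st '*' := by
  intro h
  have := List.eq_of_mem_replicate h
  simp at this

lemma hh_replicate_star (st : Nat) : hh (List.replicate st '*') = List.replicate st '*' := by
  simp [hh, List.filter_replicate, List.count_replicate]

lemma kfun_nil (st : Nat) : kfun st [] = List.replicate st '*' := by
  unfold kfun coreSpec
  rw [splitC_append_not_mem '+' _ _ (not_plus_mem_replicate_star st)]
  simp [splitC_nil, hh_replicate_star]

lemma kfun_star (st : Nat) (cs : List Char) : kfun st ('*' :: cs) = kfun (st + 1) cs := by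
  unfold kfun
  rw [show List.replicate st '*' ++ '*' :: cs = List.replicate (st + 1) '*' ++ cs by
    rw [List.replicate_succ']
    simp]

lemma kfun_plus (st : Nat) (cs : List Char) :
    kfun st ('+' :: cs) = List.replicate st '*' ++ kfun 0 cs ++ ['+'] := by
  unfold kfun coreSpec
  rw [splitC_append_not_mem '+' _ _ (not_plus_mem_replicate_star st)]
  simp only [splitC_cons_self, List.append_nil, List.nil_append,
    List.length_cons, List.map_cons, List.flatten_cons]
  rw [hh_replicate_star, List.replicate_succ']
  simp [List.append_assoc]

lemma kfun_other (st : Nat) (c : Char) (cs : List Char) (hs : c ≠ '*') (hp : c ≠ '+') :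
    kfun st (c :: cs) = c :: kfun st cs := by
  unfold kfun coreSpec
  rw [splitC_append_not_mem '+' _ _ (not_plus_mem_replicate_star st),
      splitC_append_not_mem '+' _ _ (not_plus_mem_replicate_star st),
      splitC_cons_ne '+' c cs hp]
  simp only [List.map_cons, List.flatten_cons]
  have : hh (List.replicate st '*' ++ c :: (splitC '+' cs).1)
      = c :: hh (List.replicate st '*' ++ (splitC '+' cs).1) := by
    simp [hh, List.filter_append, List.count_append, List.filter_replicate,
      List.count_replicate, hs, List.count_cons, List.filter_cons]
  rw [this]
  simp

def stepB (acc : List Char × Nat × Nat) (c : Char) : List Char × Nat × Nat :=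
  if c == '*' then (acc.1, acc.2.1 + 1, acc.2.2)
  else if c == '+' then (acc.1 ++ List.replicate acc.2.1 '*', 0, acc.2.2 + 1)
  else (acc.1 ++ [c], acc.2.1, acc.2.2)

def finB (r : List Char × Nat × Nat) : List Char :=
  r.1 ++ List.replicate r.2.1 '*' ++ List.replicate r.2.2 '+'

lemma loopB : ∀ (cs : List Char) (buf : List Char) (st pl : Nat),
    finB (cs.foldl stepB (buf, st, pl)) = buf ++ kfun st cs ++ List.replicate pl '+' := by
  intro cs
  induction cs with
  | nil =>
    intro buf st pl
    simp [finB, kfun_nil]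
  | cons c cs ih =>
    intro buf st pl
    by_cases hs : c = '*'
    · subst hs
      have : stepB (buf, st, pl) '*' = (buf, st + 1, pl) := by simp [stepB]
      rw [List.foldl_cons, this, ih buf (st + 1) pl, kfun_star]
    · by_cases hp : c = '+'
      · subst hp
        have : stepB (buf, st, pl) '+' = (buf ++ List.replicate st '*', 0, pl + 1) := by
          simp [stepB]
        rw [List.foldl_cons, this, ih (buf ++ List.replicate st '*') 0 (pl + 1), kfun_plus]
        simp [List.replicate_succ, List.append_assoc]
      · have : stepB (buf, st, pl) c = (buf ++ [c], st, pl) := by simp [stepB, hs, hp]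
        rw [List.foldl_cons, this, ih (buf ++ [c]) st pl, kfun_other st c cs hs hp]
        simp

lemma solve_alt_eq_coreSpec (str : String) : solve_alt str = String.mk (coreSpec str.toList) := by
  have h : solve_alt str = String.mk (finB (str.toList.foldl stepB ([], 0, 0))) := rfl
  rw [h, loopB str.toList [] 0 0]
  simp [kfun]

-- ===== VERDICT (by name: the statement is the Claim_ definition above) =====
theorem solve_spec : Claim_equal_solve := by
  intro str _
  unfold Spec_solve
  rw [solve_eq_coreSpec, solve_alt_eq_coreSpec]
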